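-- pv_equiv track=rewrite | github.com/elias-wu-510/company-financial-analysis | scripts/chart_sanity_scan.py | extract_svg_blocks
-- ===== SOURCE A (Python) =====
-- from typing import List, Dict, Any
--
-- def extract_svg_blocks(html: str) -> List[str]:
--     blocks = []
--     start = 0
--     while True:
--         i = html.find('<svg', start)
--         if i == -1:
--             break
--         j = html.find('</svg>', i)
--         if j == -1:
--             break
--         blocks.append(html[i:j+6])
--         start = j + 6
--     return blocks
-- ===== SOURCE B (Python) =====
-- def extract_svg_blocks(html: str):
--     # staged: one split pass cuts html at every '<svg'; a fold over the pieces
--     # re-attaches the tag, accumulates pieces until a '</svg>' appears, and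
--     # emits the block up to it.  Correct because '<svg' and '</svg>' never
--     # overlap each other, so the piece boundaries are exactly A's find points.
--     blocks = []
--     buf = None
--     for part in html.split('<svg')[1:]:
--         buf = '<svg' + part if buf is None else buf + '<svg' + part
--         k = buf.find('</svg>')
--         if k != -1:
--             blocks.append(buf[:k + 6])
--             buf = None
--     return blocks
-- ===== Notes on version B (the rewrite author's own statement) =====
-- stated objective: alternative
-- what changed: Replaces the find/advance index loop over the whole string by two stages: one split pass cutting html at every '<svg', then a fold over the pieces with a buffer accumulator that re-attaches the tag, merges pieces until a '</svg>' appears, and emits the block up to it; correct because '<svg' and '</svg>' occurrences can never overlap, so the split boundaries are exactly A's find points.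
import Mathlib
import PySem

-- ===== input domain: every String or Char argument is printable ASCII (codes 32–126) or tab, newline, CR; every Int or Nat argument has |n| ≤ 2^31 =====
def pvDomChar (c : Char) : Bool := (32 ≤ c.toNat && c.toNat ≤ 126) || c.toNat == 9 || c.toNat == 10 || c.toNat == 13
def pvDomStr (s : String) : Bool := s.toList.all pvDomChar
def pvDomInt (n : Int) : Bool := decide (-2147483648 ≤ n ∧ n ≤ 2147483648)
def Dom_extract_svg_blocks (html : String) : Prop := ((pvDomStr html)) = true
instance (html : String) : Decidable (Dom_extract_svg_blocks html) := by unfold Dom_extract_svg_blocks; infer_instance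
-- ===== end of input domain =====

-- B replaces A's find/advance index loop by a split at every '<svg' followed by a fold over
-- the pieces with a buffer accumulator; equal return value proved for all inputs.

-- ===== PORT A =====
-- fuel only makes A's `while True` loop total; html.length + 1 iterations always suffice
-- (each iteration advances `start` by at least 6); the equivalence proof shows the fuel is never exhausted
def pvLoopA (html : String) : Nat → Int → List String
  | 0, _ => []
  | fuel + 1, start =>
    let i := PySem.Str.findFrom html "<svg" start none
    if i = -1 then []
    else
      let j := PySem.Str.findFrom html "</svg>" i none
      if j = -1 then []
      else PySem.Str.slice html (some i) (some (j + 6)) :: pvLoopA html fuel (j + 6)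

def extract_svg_blocks (html : String) : List String :=
  pvLoopA html (html.toList.length + 1) 0

-- ===== PORT B =====
-- Source B's fold over html.split('<svg')[1:]: buf is None (no open tag pending) or the
-- accumulated text since the last unmatched '<svg'; a found '</svg>' emits buf[:k+6]
def pvFoldB : List String → Option (List Char) → List (List Char) → List String
  | blocks, _, [] => blocks
  | blocks, buf, part :: rest =>
    let b := match buf with
      | none => '<' :: 's' :: 'v' :: 'g' :: part
      | some b0 => b0 ++ ('<' :: 's' :: 'v' :: 'g' :: part)
    let k := PySem.Chars.find b ['<', '/', 's', 'v', 'g', '>']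
    if k ≠ -1 then
      pvFoldB (blocks ++ [String.ofList (PySem.List.slice b none (some (k + 6)))]) none rest
    else
      pvFoldB blocks (some b) rest

def extract_svg_blocks_alt (html : String) : List String :=
  pvFoldB [] none ((PySem.Chars.splitOn html.toList ['<', 's', 'v', 'g']).drop 1)

-- ===== PRECONDITION & SPEC =====
def Spec_extract_svg_blocks (html : String) (out : List String) : Prop := out = extract_svg_blocks_alt html
instance (html : String) (out : List String) : Decidable (Spec_extract_svg_blocks html out) := by unfold Spec_extract_svg_blocks; infer_instance

-- ===== CLAIM (what is proved, stated in full; the proofs are below) =====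
def Claim_equal_extract_svg_blocks : Prop := ∀ (html : String), Dom_extract_svg_blocks html → Spec_extract_svg_blocks html (extract_svg_blocks html)

-- ===== LEMMAS AND PROOFS =====

-- common reference point of both proofs: a character-level scan collecting the blocks
def pvGrab (acc : List Char) (l : List Char) : Option (List Char × List Char) :=
  if List.isPrefixOf ['<', '/', 's', 'v', 'g', '>'] l then
    some (acc ++ ['<', '/', 's', 'v', 'g', '>'], l.drop 6)
  else
    match l with
    | [] => none
    | c :: r => pvGrab (acc ++ [c]) r

theorem pvGrab_length (l : List Char) : ∀ acc mid rest, pvGrab acc l = some (mid, rest) →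
    rest.length + 6 ≤ l.length := by
  induction l with
  | nil => intro acc mid rest h; simp [pvGrab] at h
  | cons c r ih =>
    intro acc mid rest h
    rw [pvGrab] at h
    split at h
    · rename_i hp
      simp only [Option.some.injEq, Prod.mk.injEq] at h
      have hlen := (List.isPrefixOf_iff_prefix.mp hp).length_le
      have hr : rest = (c :: r).drop 6 := h.2.symm
      subst hr
      simp only [List.length_drop]
      simp at hlen ⊢; omega
    · have := ih (acc ++ [c]) mid rest h
      simp at this ⊢; omega

def pvScan : List Char → List String
  | [] => []
  | c :: rest =>
    if List.isPrefixOf ['<', 's', 'v', 'g'] (c :: rest) then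
      match h : pvGrab [] (List.drop 4 (c :: rest)) with
      | some (mid, rest') => String.ofList (['<', 's', 'v', 'g'] ++ mid) :: pvScan rest'
      | none => []
    else pvScan rest
termination_by l => l.length
decreasing_by
  · have := pvGrab_length (List.drop 4 (c :: rest)) [] mid rest' h
    simp only [List.length_drop] at this
    simp at this ⊢; omega
  · simp

-- `Chars.find` is characterised by first occurrence
theorem pvFind_unique (r sub : List Char) (q : Nat) (h1 : sub <+: r.drop q)
    (h2 : ∀ i < q, ¬ sub <+: r.drop i) : PySem.Chars.find r sub = q := by
  have hin : sub <:+: r := by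
    obtain ⟨v, hv⟩ := h1
    exact ⟨r.take q, v, by rw [List.append_assoc, hv, List.take_append_drop]⟩
  have h0 : 0 ≤ PySem.Chars.find r sub := (PySem.Chars.find_nonneg_iff r sub).mpr hin
  obtain ⟨ha, hb⟩ := PySem.Chars.find_spec h0
  rcases lt_trichotomy (PySem.Chars.find r sub).toNat q with h | h | h
  · exact absurd ha (h2 _ h)
  · omega
  · exact absurd h1 (hb q h)

theorem pvScan_no_open (l : List Char) (h : ¬ ['<', 's', 'v', 'g'] <:+: l) : pvScan l = [] := by
  induction l with
  | nil => rw [pvScan]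
  | cons c r ih =>
    rw [pvScan, if_neg, ih]
    · intro hi; exact h (List.infix_cons_iff.mpr (Or.inr hi))
    · intro hp
      exact h (List.infix_cons_iff.mpr (Or.inl (List.isPrefixOf_iff_prefix.mp hp)))

theorem pvScan_skip (p : Nat) : ∀ l : List Char, (∀ q < p, ¬ ['<', 's', 'v', 'g'] <+: l.drop q) →
    pvScan l = pvScan (l.drop p) := by
  induction p with
  | zero => intro l _; rw [List.drop_zero]
  | succ p ih =>
    intro l h
    cases l with
    | nil => simp
    | cons c r =>
      have h0 := h 0 (Nat.succ_pos p)
      rw [pvScan, if_neg, List.drop_succ_cons]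
      · exact ih r (fun q hq => h (q + 1) (by omega))
      · intro hp; exact h0 (by simpa using List.isPrefixOf_iff_prefix.mp hp)

theorem pvGrab_no_close (l : List Char) (h : ¬ ['<', '/', 's', 'v', 'g', '>'] <:+: l) :
    ∀ acc, pvGrab acc l = none := by
  induction l with
  | nil => intro acc; simp [pvGrab, List.isPrefixOf]
  | cons c r ih =>
    intro acc
    rw [pvGrab, if_neg]
    · exact ih (fun hi => h (List.infix_cons_iff.mpr (Or.inr hi))) (acc ++ [c])
    · intro hp
      exact h (List.infix_cons_iff.mpr (Or.inl (List.isPrefixOf_iff_prefix.mp hp)))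

theorem pvGrab_close (l : List Char) (h : ['<', '/', 's', 'v', 'g', '>'] <:+: l) : ∀ acc,
    pvGrab acc l = some
      (acc ++ l.take (PySem.Chars.find l ['<', '/', 's', 'v', 'g', '>']).toNat ++ ['<', '/', 's', 'v', 'g', '>'],
       l.drop ((PySem.Chars.find l ['<', '/', 's', 'v', 'g', '>']).toNat + 6)) := by
  induction l with
  | nil => simp at h
  | cons c r ih =>
    intro acc
    by_cases hp : ['<', '/', 's', 'v', 'g', '>'] <+: c :: r
    · have hf : PySem.Chars.find (c :: r) ['<', '/', 's', 'v', 'g', '>'] = ((0 : Nat) : Int) :=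
        pvFind_unique _ _ 0 (by simpa only [List.drop_zero] using hp)
          (fun i hi => absurd hi (by omega))
      rw [pvGrab, if_pos (List.isPrefixOf_iff_prefix.mpr hp), hf]
      simp
    · have hin : ['<', '/', 's', 'v', 'g', '>'] <:+: r := (List.infix_cons_iff.mp h).resolve_left hp
      have h0 : 0 ≤ PySem.Chars.find r ['<', '/', 's', 'v', 'g', '>'] :=
        (PySem.Chars.find_nonneg_iff r _).mpr hin
      obtain ⟨ha, hb⟩ := PySem.Chars.find_spec h0
      have hf : PySem.Chars.find (c :: r) ['<', '/', 's', 'v', 'g', '>'] =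
          (((PySem.Chars.find r ['<', '/', 's', 'v', 'g', '>']).toNat + 1 : Nat) : Int) := by
        apply pvFind_unique
        · simpa only [List.drop_succ_cons] using ha
        · intro i hi
          cases i with
          | zero => simpa only [List.drop_zero] using hp
          | succ i => simpa only [List.drop_succ_cons] using hb i (by omega)
      rw [pvGrab, if_neg (fun hp' => hp (List.isPrefixOf_iff_prefix.mp hp')), ih hin (acc ++ [c]), hf]
      rw [Int.toNat_natCast, List.take_succ_cons]
      have h7 : (PySem.Chars.find r ['<', '/', 's', 'v', 'g', '>']).toNat + 1 + 6 =
          ((PySem.Chars.find r ['<', '/', 's', 'v', 'g', '>']).toNat + 6) + 1 := by omega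
      rw [h7, List.drop_succ_cons]
      simp

theorem pvLoopA_eq_scan (html : String) : ∀ (fuel : Nat) (start : Nat),
    start ≤ html.toList.length → html.toList.length - start < fuel →
    pvLoopA html fuel (start : Int) = pvScan (html.toList.drop start) := by
  intro fuel
  induction fuel with
  | zero => intro start hs hf; omega
  | succ fuel ih =>
    intro start hs hf
    rw [pvLoopA]
    have hsvgL : ("<svg" : String).toList = ['<', 's', 'v', 'g'] := rfl
    have hclsL : ("</svg>" : String).toList = ['<', '/', 's', 'v', 'g', '>'] := rfl
    simp only [PySem.Str.findFrom_eq, hsvgL, hclsL]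
    by_cases hi : PySem.Chars.findFrom html.toList ['<', 's', 'v', 'g'] (↑start) none = -1
    · rw [if_pos hi, pvScan_no_open]
      exact (PySem.Chars.findFrom_natCast_eq_neg_one_iff html.toList ['<', 's', 'v', 'g'] start hs).mp hi
    · rw [if_neg hi]
      obtain ⟨h1, h2, h3⟩ := PySem.Chars.findFrom_natCast_spec html.toList ['<', 's', 'v', 'g'] start hs hi
      have h0i : (0 : Int) ≤ PySem.Chars.findFrom html.toList ['<', 's', 'v', 'g'] (↑start) none :=
        le_trans (Int.natCast_nonneg start) h1
      have hit : PySem.Chars.findFrom html.toList ['<', 's', 'v', 'g'] (↑start) none =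
          ((PySem.Chars.findFrom html.toList ['<', 's', 'v', 'g'] (↑start) none).toNat : Int) :=
        (Int.toNat_of_nonneg h0i).symm
      generalize htdef : (PySem.Chars.findFrom html.toList ['<', 's', 'v', 'g'] (↑start) none).toNat = t at h2 h3 hit
      have hst : start ≤ t := by
        have h1' := h1; rw [hit] at h1'; exact_mod_cast h1'
      rw [hit]
      obtain ⟨u, hu⟩ := h2
      have hul : 4 + u.length = html.toList.length - t := by
        have := congrArg List.length hu
        simp only [List.length_append, List.length_drop, List.length_cons, List.length_nil] at this
        omega
      have hlen4 : t + 4 ≤ html.toList.length := by omega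
      have hBskip : pvScan (html.toList.drop start) = pvScan (html.toList.drop t) := by
        rw [pvScan_skip (t - start) (html.toList.drop start) ?hcond, List.drop_drop,
          show start + (t - start) = t from by omega]
        case hcond =>
          intro q hq
          rw [List.drop_drop]
          exact h3 (start + q) (by omega) (by omega)
      rw [hBskip, ← hu]
      by_cases hj : PySem.Chars.findFrom html.toList ['<', '/', 's', 'v', 'g', '>'] (↑t) none = -1
      · rw [if_pos hj]
        have hnin := (PySem.Chars.findFrom_natCast_eq_neg_one_iff html.toList ['<', '/', 's', 'v', 'g', '>'] t (by omega)).mp hj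
        have hsuf : u <:+ List.drop t html.toList := ⟨['<', 's', 'v', 'g'], hu⟩
        have hninu : ¬ ['<', '/', 's', 'v', 'g', '>'] <:+: u := fun hcu =>
          hnin (hcu.trans hsuf.isInfix)
        show ([] : List String) = pvScan ('<' :: 's' :: 'v' :: 'g' :: u)
        rw [pvScan, if_pos (show List.isPrefixOf ['<', 's', 'v', 'g'] ('<' :: 's' :: 'v' :: 'g' :: u) = true from List.isPrefixOf_iff_prefix.mpr ⟨u, rfl⟩)]
        split
        · rename_i mid rest' heq
          rw [show List.drop 4 ('<' :: 's' :: 'v' :: 'g' :: u) = u from rfl,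
            pvGrab_no_close u hninu] at heq
          simp at heq
        · rfl
      · rw [if_neg hj]
        obtain ⟨hj1, hj2, hj3⟩ := PySem.Chars.findFrom_natCast_spec html.toList ['<', '/', 's', 'v', 'g', '>'] t (by omega) hj
        have h0j : (0 : Int) ≤ PySem.Chars.findFrom html.toList ['<', '/', 's', 'v', 'g', '>'] (↑t) none :=
          le_trans (Int.natCast_nonneg t) hj1
        have hjw : PySem.Chars.findFrom html.toList ['<', '/', 's', 'v', 'g', '>'] (↑t) none =
            ((PySem.Chars.findFrom html.toList ['<', '/', 's', 'v', 'g', '>'] (↑t) none).toNat : Int) :=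
          (Int.toNat_of_nonneg h0j).symm
        generalize hwdef : (PySem.Chars.findFrom html.toList ['<', '/', 's', 'v', 'g', '>'] (↑t) none).toNat = w at hj2 hj3 hjw
        have htw0 : t ≤ w := by
          have hj1' := hj1; rw [hjw] at hj1'; exact_mod_cast hj1'
        rw [hjw]
        have hj2' := hj2
        obtain ⟨v, hv⟩ := hj2'
        have hvl : 6 + v.length = html.toList.length - w := by
          have := congrArg List.length hv
          simp only [List.length_append, List.length_drop, List.length_cons, List.length_nil] at this
          omega
        have hlen6 : w + 6 ≤ html.toList.length := by omega
        have htw : t + 4 ≤ w := by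
          by_contra hlt
          have hdw : html.toList.drop w = List.drop (w - t) (['<', 's', 'v', 'g'] ++ u) := by
            calc html.toList.drop w = List.drop (w - t) (html.toList.drop t) := by
                  rw [List.drop_drop]; congr 1; omega
            _ = List.drop (w - t) (['<', 's', 'v', 'g'] ++ u) := by rw [← hu]
          have hj2'' : ['<', '/', 's', 'v', 'g', '>'] <+: List.drop (w - t) (['<', 's', 'v', 'g'] ++ u) :=
            hdw ▸ hj2
          have hd4 : w - t < 4 := by omega
          interval_cases hd : (w - t) <;> simp [List.cons_prefix_cons] at hj2''
        have hu4 : ∀ k, u.drop k = html.toList.drop (t + 4 + k) := by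
          intro k
          have h4 : List.drop 4 (['<', 's', 'v', 'g'] ++ u) = u :=
            (List.drop_left : List.drop (['<', 's', 'v', 'g'] : List Char).length (['<', 's', 'v', 'g'] ++ u) = u)
          conv_lhs => rw [← h4]
          rw [hu, List.drop_drop, List.drop_drop]; congr 1; omega
        have hq'le : w - (t + 4) ≤ u.length := by omega
        have hdq : u.drop (w - (t + 4)) = ['<', '/', 's', 'v', 'g', '>'] ++ v := by
          rw [hu4]
          have harith : t + 4 + (w - (t + 4)) = w := by omega
          rw [harith, ← hv]
        have hfind : PySem.Chars.find u ['<', '/', 's', 'v', 'g', '>'] = ((w - (t + 4) : Nat) : Int) := by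
          apply pvFind_unique
          · exact ⟨v, hdq.symm ▸ rfl⟩
          · intro idx hidx
            rw [hu4]
            exact hj3 (t + 4 + idx) (by omega) (by omega)
        have hueq : u = u.take (w - (t + 4)) ++ (['<', '/', 's', 'v', 'g', '>'] ++ v) := by
          conv_lhs => rw [← List.take_append_drop (w - (t + 4)) u]
          rw [hdq]
        have hinu : ['<', '/', 's', 'v', 'g', '>'] <:+: u :=
          ⟨u.take (w - (t + 4)), v, by rw [List.append_assoc, ← hueq]⟩
        show _ = pvScan ('<' :: 's' :: 'v' :: 'g' :: u)
        rw [pvScan, if_pos (show List.isPrefixOf ['<', 's', 'v', 'g'] ('<' :: 's' :: 'v' :: 'g' :: u) = true from List.isPrefixOf_iff_prefix.mpr ⟨u, rfl⟩)]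
        split
        · rename_i mid rest' heq
          rw [show List.drop 4 ('<' :: 's' :: 'v' :: 'g' :: u) = u from rfl,
            pvGrab_close u hinu [], hfind] at heq
          simp only [Int.toNat_natCast, List.nil_append, Option.some.injEq, Prod.mk.injEq] at heq
          obtain ⟨hmid, hrest⟩ := heq
          subst hmid
          subst hrest
          congr 1
          · apply String.toList_inj.mp
            rw [PySem.Str.toList_slice, PySem.Chars.slice_eq_listSlice, String.toList_ofList]
            have hcast : ((w : Int) + 6) = ((w + 6 : Nat) : Int) := by push_cast; ring
            rw [hcast, PySem.List.slice_natCast, ← hu]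
            have hP : ('<' :: 's' :: 'v' :: 'g' :: (u.take (w - (t + 4)) ++ ['<', '/', 's', 'v', 'g', '>'])).length
                = w + 6 - t := by
              simp [List.length_take]
              omega
            have hdecomp : ['<', 's', 'v', 'g'] ++ u =
                ('<' :: 's' :: 'v' :: 'g' :: (u.take (w - (t + 4)) ++ ['<', '/', 's', 'v', 'g', '>'])) ++ v := by
              conv_lhs => rw [hueq]
              simp
            rw [hdecomp, ← hP, List.take_left]
            simp
          · have hr : u.drop ((w - (t + 4)) + 6) = html.toList.drop (w + 6) := by
              rw [hu4]; congr 1; omega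
            rw [hr]
            have hc2 : ((w : Int) + 6) = ((w + 6 : Nat) : Int) := by push_cast; ring
            rw [hc2]
            exact ih (w + 6) (by omega) (by omega)
        · rename_i heq
          rw [show List.drop 4 ('<' :: 's' :: 'v' :: 'g' :: u) = u from rfl,
            pvGrab_close u hinu []] at heq
          simp at heq

-- ==== B side ====

-- the text the remaining split pieces stand for: each piece with its '<svg' re-attached
def pvGlue (ps : List (List Char)) : List Char :=
  (ps.map (fun p => '<' :: 's' :: 'v' :: 'g' :: p)).flatten

theorem pvGlue_head (ps : List (List Char)) :
    pvGlue ps = [] ∨ (pvGlue ps).head? = some '<' := by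
  cases ps with
  | nil => exact Or.inl rfl
  | cons p r => exact Or.inr rfl

theorem pvScan_no_close (l : List Char) (h : ¬ ['<', '/', 's', 'v', 'g', '>'] <:+: l) :
    pvScan l = [] := by
  induction l with
  | nil => rw [pvScan]
  | cons c r ih =>
    rw [pvScan]
    split
    · rename_i hp
      have : ¬ ['<', '/', 's', 'v', 'g', '>'] <:+: List.drop 4 (c :: r) := fun hi =>
        h (hi.trans (List.drop_subset 4 (c :: r) |> fun _ => (List.drop_suffix 4 (c :: r)).isInfix))
      rw [pvGrab_no_close _ this]
    · exact ih fun hi => h (List.infix_cons_iff.mpr (Or.inr hi))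

-- no occurrence of `pat` can start inside `p` and continue into `X` when X begins with '<'
-- while every proper tail of `pat` begins with another character
theorem pv_no_cross (pat p X : List Char) (q : Nat) (hq : q < p.length)
    (hp : ¬ pat <+: p.drop q)
    (hX : X = [] ∨ X.head? = some '<')
    (hpat : ∀ m, 1 ≤ m → m < pat.length → ¬ (pat.drop m).head? = some '<') :
    ¬ pat <+: List.drop q (p ++ X) := by
  intro h
  rw [List.drop_append_of_le_length (le_of_lt hq)] at h
  by_cases hlen : pat.length ≤ (p.drop q).length
  · apply hp
    obtain ⟨t, ht⟩ := h
    have h1 : pat = (p.drop q ++ X).take pat.length := by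
      rw [← ht, List.take_left']; rfl
    rw [List.take_append_of_le_length hlen] at h1
    exact h1 ▸ List.take_prefix _ _
  · have hm1 : 1 ≤ (p.drop q).length := by simp; omega
    have hm2 : (p.drop q).length < pat.length := by omega
    obtain ⟨t, ht⟩ := h
    have hXeq : X = pat.drop (p.drop q).length ++ t := by
      have := congrArg (List.drop (p.drop q).length) ht
      rw [List.drop_left, List.drop_append_of_le_length (by omega)] at this
      exact this.symm
    have hne : pat.drop (p.drop q).length ≠ [] := by
      intro h0
      have := List.drop_eq_nil_iff.mp h0
      omega
    have hXh : X.head? = (pat.drop (p.drop q).length).head? := by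
      rw [hXeq, List.head?_append]
      cases hh : (pat.drop (p.drop q).length).head? with
      | none => exact absurd (List.head?_eq_none_iff.mp hh) hne
      | some c => rfl
    rcases hX with h0 | h0
    · rw [h0] at hXeq; exact hne (List.append_eq_nil_iff.mp hXeq.symm).1
    · exact hpat (p.drop q).length hm1 hm2 (by rw [← hXh, h0])

def pvGlueSep (sep : List Char) (ps : List (List Char)) : List Char :=
  (ps.map (fun p => sep ++ p)).flatten

theorem pvGlue_eq (ps : List (List Char)) : pvGlue ps = pvGlueSep ['<', 's', 'v', 'g'] ps := rfl

-- structure of Python's str.split: the pieces joined by the separator give back the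
-- string, and no piece contains the separator
theorem pvSplit_go_spec (sep : List Char) (hsep : sep ≠ []) :
    ∀ (fuel : Nat) (l cur : List Char) (acc : List (List Char)), l.length < fuel →
    ∃ p ps, PySem.Chars.splitOn.go sep fuel l cur acc =
        acc.reverse ++ (cur.reverse ++ p) :: ps ∧
      p ++ pvGlueSep sep ps = l ∧
      (¬ sep <:+: p) ∧ (∀ q ∈ ps, ¬ sep <:+: q) := by
  intro fuel
  induction fuel with
  | zero => intro l cur acc hl; omega
  | succ fuel ih =>
    intro l cur acc hl
    cases l with
    | nil =>
      refine ⟨[], [], ?_, by simp [pvGlueSep], fun h => hsep (List.infix_nil.mp h), by simp⟩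
      rw [PySem.Chars.splitOn.go]
      · simp
      · omega
    | cons c rest =>
      rw [PySem.Chars.splitOn.go]
      by_cases hp : sep.isPrefixOf (c :: rest)
      · rw [if_pos hp]
        obtain ⟨p', ps', hgo, hjoin, hp', hps'⟩ :=
          ih (List.drop sep.length (c :: rest)) [] (cur.reverse :: acc)
            (by have hs1 : 0 < sep.length := List.length_pos_iff.mpr hsep
                simp only [List.length_drop, List.length_cons] at hl ⊢
                omega)
        refine ⟨[], p' :: ps', ?_, ?_, fun h => hsep (List.infix_nil.mp h), ?_⟩
        · rw [hgo]; simp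
        · obtain ⟨t, ht⟩ := List.isPrefixOf_iff_prefix.mp hp
          have hdrop : List.drop sep.length (c :: rest) = t := by
            rw [← ht, List.drop_left]
          rw [hdrop] at hjoin
          show [] ++ pvGlueSep sep (p' :: ps') = c :: rest
          simp only [pvGlueSep, List.map_cons, List.flatten_cons, List.nil_append] at hjoin ⊢
          rw [List.append_assoc, hjoin, ht]
        · intro q hq
          rcases List.mem_cons.mp hq with h0 | h0
          · exact h0 ▸ hp'
          · exact hps' q h0
      · rw [if_neg hp]
        obtain ⟨p', ps', hgo, hjoin, hp', hps'⟩ := ih rest (c :: cur) acc (by simp at hl ⊢; omega)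
        refine ⟨c :: p', ps', ?_, ?_, ?_, hps'⟩
        · rw [hgo]; simp
        · show (c :: p') ++ pvGlueSep sep ps' = c :: rest
          rw [List.cons_append, hjoin]
        · intro hin
          rcases List.infix_cons_iff.mp hin with h0 | h0
          · apply hp
            apply List.isPrefixOf_iff_prefix.mpr
            have hpref : c :: p' <+: c :: rest := by
              rw [List.cons_prefix_cons]
              exact ⟨rfl, ⟨pvGlueSep sep ps', hjoin⟩⟩
            exact h0.trans hpref
          · exact hp' h0

theorem pvSplitOn_spec (sep l : List Char) (hsep : sep ≠ []) :
    ∃ p ps, PySem.Chars.splitOn l sep = p :: ps ∧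
      p ++ pvGlueSep sep ps = l ∧
      (¬ sep <:+: p) ∧ (∀ q ∈ ps, ¬ sep <:+: q) := by
  obtain ⟨p, ps, hgo, hjoin, hp, hps⟩ :=
    pvSplit_go_spec sep hsep (l.length + 1) l [] [] (by omega)
  exact ⟨p, ps, by simpa [PySem.Chars.splitOn] using hgo, hjoin, hp, hps⟩

theorem pvGlue_cons (p : List Char) (ps : List (List Char)) :
    pvGlue (p :: ps) = '<' :: 's' :: 'v' :: 'g' :: (p ++ pvGlue ps) := by
  simp [pvGlue]

theorem pv_infix_of_prefix_drop {a l : List Char} {q : Nat} (h : a <+: l.drop q) : a <:+: l := by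
  obtain ⟨v, hv⟩ := h
  exact ⟨l.take q, v, by rw [List.append_assoc, hv, List.take_append_drop]⟩

-- one iteration of Source B's fold, against the scan of the text it stands for
theorem pvFold_step (rest : List (List Char)) (b0 p : List Char)
    (hb0c : ¬ ['<', '/', 's', 'v', 'g', '>'] <:+: b0)
    (hb0s : b0 = [] ∨ ['<', 's', 'v', 'g'] <+: b0)
    (hpart : ¬ ['<', 's', 'v', 'g'] <:+: p)
    (ihnone : ∀ blocks, pvFoldB blocks none rest = blocks ++ pvScan (pvGlue rest))
    (ihsome : ∀ blocks b, ['<', 's', 'v', 'g'] <+: b → ¬ ['<', '/', 's', 'v', 'g', '>'] <:+: b →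
        pvFoldB blocks (some b) rest = blocks ++ pvScan (b ++ pvGlue rest))
    (blocks : List String) :
    (if PySem.Chars.find (b0 ++ ('<' :: 's' :: 'v' :: 'g' :: p)) ['<', '/', 's', 'v', 'g', '>'] ≠ -1 then
       pvFoldB (blocks ++ [String.ofList (PySem.List.slice (b0 ++ ('<' :: 's' :: 'v' :: 'g' :: p)) none
         (some (PySem.Chars.find (b0 ++ ('<' :: 's' :: 'v' :: 'g' :: p)) ['<', '/', 's', 'v', 'g', '>'] + 6)))]) none rest
     else pvFoldB blocks (some (b0 ++ ('<' :: 's' :: 'v' :: 'g' :: p))) rest)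
    = blocks ++ pvScan (b0 ++ pvGlue (p :: rest)) := by
  have harg : b0 ++ pvGlue (p :: rest) = (b0 ++ ('<' :: 's' :: 'v' :: 'g' :: p)) ++ pvGlue rest := by
    rw [pvGlue_cons]; simp
  have hsep : ['<', 's', 'v', 'g'] <+: b0 ++ ('<' :: 's' :: 'v' :: 'g' :: p) := by
    rcases hb0s with h0 | h0
    · subst h0; exact ⟨p, rfl⟩
    · exact h0.trans (List.prefix_append b0 _)
  by_cases hk : PySem.Chars.find (b0 ++ ('<' :: 's' :: 'v' :: 'g' :: p)) ['<', '/', 's', 'v', 'g', '>'] = -1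
  · rw [if_neg (by simpa using hk)]
    have hnc : ¬ ['<', '/', 's', 'v', 'g', '>'] <:+: b0 ++ ('<' :: 's' :: 'v' :: 'g' :: p) :=
      (PySem.Chars.find_eq_neg_one_iff _ _).mp hk
    rw [ihsome blocks _ hsep hnc, harg]
  · rw [if_pos hk]
    have hin : ['<', '/', 's', 'v', 'g', '>'] <:+: b0 ++ ('<' :: 's' :: 'v' :: 'g' :: p) :=
      (PySem.Chars.find_ne_neg_one_iff _ _).mp hk
    have h0 : 0 ≤ PySem.Chars.find (b0 ++ ('<' :: 's' :: 'v' :: 'g' :: p)) ['<', '/', 's', 'v', 'g', '>'] :=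
      (PySem.Chars.find_nonneg_iff _ _).mpr hin
    obtain ⟨hcl, hmin⟩ := PySem.Chars.find_spec h0
    generalize hkn : (PySem.Chars.find (b0 ++ ('<' :: 's' :: 'v' :: 'g' :: p)) ['<', '/', 's', 'v', 'g', '>']).toNat = kn at hcl hmin
    have hkcast : PySem.Chars.find (b0 ++ ('<' :: 's' :: 'v' :: 'g' :: p)) ['<', '/', 's', 'v', 'g', '>'] = ((kn : Nat) : Int) := by
      rw [← hkn, Int.toNat_of_nonneg h0]
    obtain ⟨u0, hu0⟩ : ∃ u0, b0 ++ ('<' :: 's' :: 'v' :: 'g' :: p) = '<' :: 's' :: 'v' :: 'g' :: u0 := by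
      obtain ⟨t, ht⟩ := hsep
      exact ⟨t, ht.symm⟩
    have hknb : kn + 6 ≤ (b0 ++ ('<' :: 's' :: 'v' :: 'g' :: p)).length := by
      have := hcl.length_le
      simp only [List.length_drop, List.length_cons, List.length_nil] at this ⊢
      omega
    -- the close cannot sit within b0 or overlap the re-attached '<svg'
    have hb0kn : b0.length + 4 ≤ kn := by
      by_contra hlt
      push_neg at hlt
      by_cases hc1 : kn < b0.length
      · exact pv_no_cross ['<', '/', 's', 'v', 'g', '>'] b0 ('<' :: 's' :: 'v' :: 'g' :: p) kn hc1
          (fun h => hb0c (pv_infix_of_prefix_drop h)) (Or.inr rfl) (by decide) hcl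
      · push_neg at hc1
        have hd : (b0 ++ ('<' :: 's' :: 'v' :: 'g' :: p)).drop kn =
            List.drop (kn - b0.length) ('<' :: 's' :: 'v' :: 'g' :: p) := by
          rw [List.drop_append]
          rw [List.drop_eq_nil_of_le hc1, List.nil_append]
        rw [hd] at hcl
        have hm4 : kn - b0.length < 4 := by omega
        interval_cases hm : (kn - b0.length) <;> simp [List.cons_prefix_cons] at hcl
    have hkn4 : 4 ≤ kn := by omega
    have hu0len : kn + 2 ≤ u0.length := by
      have := congrArg List.length hu0
      simp only [List.length_append, List.length_cons] at this hknb
      omega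
    have hdropu : ∀ j, u0.drop j = (b0 ++ ('<' :: 's' :: 'v' :: 'g' :: p)).drop (4 + j) := by
      intro j
      rw [hu0, ← List.drop_drop]
      rfl
    -- position of the close inside u0 ++ glue
    have hclu : ['<', '/', 's', 'v', 'g', '>'] <+: u0.drop (kn - 4) := by
      have : (4 + (kn - 4)) = kn := by omega
      rw [hdropu, this]
      exact hcl
    have hfind : PySem.Chars.find (u0 ++ pvGlue rest) ['<', '/', 's', 'v', 'g', '>'] = ((kn - 4 : Nat) : Int) := by
      apply pvFind_unique
      · rw [List.drop_append_of_le_length (by omega)]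
        exact hclu.trans (List.prefix_append _ _)
      · intro i hi
        apply pv_no_cross ['<', '/', 's', 'v', 'g', '>'] u0 (pvGlue rest) i (by omega)
          ?_ (pvGlue_head rest) (by decide)
        rw [hdropu]
        exact hmin (4 + i) (by omega)
    have hwin : ['<', '/', 's', 'v', 'g', '>'] <:+: u0 ++ pvGlue rest := by
      apply pv_infix_of_prefix_drop (q := kn - 4)
      rw [List.drop_append_of_le_length (by omega)]
      exact hclu.trans (List.prefix_append _ _)
    -- evaluate the scan side one block
    have hscan : pvScan (b0 ++ pvGlue (p :: rest)) =
        String.ofList (['<', 's', 'v', 'g'] ++ ((u0 ++ pvGlue rest).take (kn - 4) ++ ['<', '/', 's', 'v', 'g', '>'])) ::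
          pvScan ((u0 ++ pvGlue rest).drop ((kn - 4) + 6)) := by
      rw [harg, hu0]
      show pvScan ('<' :: 's' :: 'v' :: 'g' :: (u0 ++ pvGlue rest)) = _
      rw [pvScan, if_pos (show List.isPrefixOf ['<', 's', 'v', 'g'] ('<' :: 's' :: 'v' :: 'g' :: (u0 ++ pvGlue rest)) = true from
        List.isPrefixOf_iff_prefix.mpr ⟨u0 ++ pvGlue rest, rfl⟩)]
      split
      · rename_i mid rest' heq
        rw [show List.drop 4 ('<' :: 's' :: 'v' :: 'g' :: (u0 ++ pvGlue rest)) = u0 ++ pvGlue rest from rfl,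
          pvGrab_close _ hwin [], hfind] at heq
        simp only [Int.toNat_natCast, List.nil_append, Option.some.injEq, Prod.mk.injEq] at heq
        rw [← heq.1, ← heq.2]
      · rename_i heq
        rw [show List.drop 4 ('<' :: 's' :: 'v' :: 'g' :: (u0 ++ pvGlue rest)) = u0 ++ pvGlue rest from rfl,
          pvGrab_close _ hwin []] at heq
        simp at heq
    -- the emitted block is b'[:k+6]
    have hblock : PySem.List.slice (b0 ++ ('<' :: 's' :: 'v' :: 'g' :: p)) none
        (some (PySem.Chars.find (b0 ++ ('<' :: 's' :: 'v' :: 'g' :: p)) ['<', '/', 's', 'v', 'g', '>'] + 6)) =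
        ['<', 's', 'v', 'g'] ++ ((u0 ++ pvGlue rest).take (kn - 4) ++ ['<', '/', 's', 'v', 'g', '>']) := by
      rw [hkcast]
      have hc6 : ((kn : Int) + 6) = ((kn + 6 : Nat) : Int) := by push_cast; ring
      rw [hc6, PySem.List.slice_to _ (by positivity), Int.toNat_natCast]
      rw [hu0]
      have h1 : (u0 ++ pvGlue rest).take (kn - 4) = u0.take (kn - 4) :=
        List.take_append_of_le_length (by omega)
      have h2 : List.take (kn + 6) ('<' :: 's' :: 'v' :: 'g' :: u0) =
          '<' :: 's' :: 'v' :: 'g' :: u0.take (kn + 2) := by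
        have h24 : kn + 6 = 4 + (kn + 2) := by omega
        conv_lhs => rw [h24, List.take_add]
        simp
      have h3 : u0.take (kn + 2) = u0.take (kn - 4) ++ (u0.drop (kn - 4)).take 6 := by
        have : kn + 2 = (kn - 4) + 6 := by omega
        rw [this, List.take_add]
      have h4 : (u0.drop (kn - 4)).take 6 = ['<', '/', 's', 'v', 'g', '>'] := by
        obtain ⟨t, ht⟩ := hclu
        rw [← ht]
        rfl
      rw [h2, h3, h4, h1]
      rfl
    -- the text after the block scans like the remaining glue alone
    have hrest : pvScan ((u0 ++ pvGlue rest).drop ((kn - 4) + 6)) = pvScan (pvGlue rest) := by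
      have hd : (u0 ++ pvGlue rest).drop ((kn - 4) + 6) = u0.drop (kn + 2) ++ pvGlue rest := by
        rw [List.drop_append_of_le_length (by omega)]
        congr 2
        omega
      rw [hd]
      have hnosep : ∀ q < (u0.drop (kn + 2)).length,
          ¬ ['<', 's', 'v', 'g'] <+: (u0.drop (kn + 2) ++ pvGlue rest).drop q := by
        intro q hq
        apply pv_no_cross ['<', 's', 'v', 'g'] (u0.drop (kn + 2)) (pvGlue rest) q hq
          ?_ (pvGlue_head rest) (by decide)
        rw [List.drop_drop, hdropu]
        have hsplitb : (b0 ++ ('<' :: 's' :: 'v' :: 'g' :: p)).drop (4 + (kn + 2 + q)) =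
            p.drop (4 + (kn + 2 + q) - b0.length - 4) := by
          rw [List.drop_append, List.drop_eq_nil_of_le (by omega), List.nil_append]
          have : 4 + (kn + 2 + q) - b0.length = 4 + (4 + (kn + 2 + q) - b0.length - 4) := by omega
          conv_lhs => rw [this, ← List.drop_drop]
          simp
        rw [hsplitb]
        exact fun h => hpart (pv_infix_of_prefix_drop h)
      rw [pvScan_skip (u0.drop (kn + 2)).length _ hnosep, List.drop_left]
    rw [ihnone, hscan, hblock, hrest]
    simp

theorem pvFold_spec : ∀ parts : List (List Char),
    (∀ p ∈ parts, ¬ ['<', 's', 'v', 'g'] <:+: p) →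
    (∀ blocks, pvFoldB blocks none parts = blocks ++ pvScan (pvGlue parts)) ∧
    (∀ blocks b, ['<', 's', 'v', 'g'] <+: b → ¬ ['<', '/', 's', 'v', 'g', '>'] <:+: b →
      pvFoldB blocks (some b) parts = blocks ++ pvScan (b ++ pvGlue parts)) := by
  intro parts
  induction parts with
  | nil =>
    intro _
    refine ⟨fun blocks => by simp [pvFoldB, pvGlue, pvScan], fun blocks b hb hbc => ?_⟩
    rw [pvFoldB]
    rw [show pvGlue ([] : List (List Char)) = [] from rfl, List.append_nil,
      pvScan_no_close b hbc, List.append_nil]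
  | cons p rest ih =>
    intro hparts
    have hpart : ¬ ['<', 's', 'v', 'g'] <:+: p := hparts p (List.mem_cons_self ..)
    obtain ⟨ihnone, ihsome⟩ := ih (fun q hq => hparts q (List.mem_cons_of_mem p hq))
    constructor
    · intro blocks
      rw [pvFoldB]
      have := pvFold_step rest [] p (by simp) (Or.inl rfl) hpart ihnone ihsome blocks
      simpa using this
    · intro blocks b hb hbc
      rw [pvFoldB]
      exact pvFold_step rest b p hbc (Or.inr hb) hpart ihnone ihsome blocks

-- ===== VERDICT (by name: the statement is the Claim_ definition above) =====
theorem extract_svg_blocks_spec : Claim_equal_extract_svg_blocks := by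
  intro html _
  unfold Spec_extract_svg_blocks extract_svg_blocks extract_svg_blocks_alt
  have hA : pvLoopA html (html.toList.length + 1) 0 = pvScan html.toList := by
    have h := pvLoopA_eq_scan html (html.toList.length + 1) 0 (by omega) (by omega)
    simpa using h
  obtain ⟨p, ps, hsplit, hjoin, hp, hps⟩ :=
    pvSplitOn_spec ['<', 's', 'v', 'g'] html.toList (by decide)
  rw [hsplit, List.drop_succ_cons, List.drop_zero]
  have hB : pvFoldB [] none ps = pvScan (pvGlue ps) := by
    simpa using (pvFold_spec ps hps).1 []
  have hl : html.toList = p ++ pvGlue ps := by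
    rw [← hjoin, ← pvGlue_eq]
  have hskip : pvScan html.toList = pvScan (pvGlue ps) := by
    rw [hl, pvScan_skip p.length (p ++ pvGlue ps) ?hnosep, List.drop_left]
    case hnosep =>
      intro q hq
      exact pv_no_cross ['<', 's', 'v', 'g'] p (pvGlue ps) q hq
        (fun h => hp (pv_infix_of_prefix_drop h)) (pvGlue_head ps) (by decide)
  rw [hA, hskip, hB]
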